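-- pv_equiv track=rewrite | github.com/HyerinPark1998/algorithm_study | 2024/2월/day1.py | solution
-- ===== SOURCE A (Python) =====
-- def solution(k, tangerine):
--     # 크기 별로 각각 몇개 있는지 파악하기
--     sizes = {}
--     for s in tangerine:
--         if s in sizes:
--             sizes[s] += 1
--         else:
--             sizes[s] = 1
--     # 개수가 많은것부터 상자에 담기
--     sorted_sizes = dict(
--         sorted(sizes.items(), key=lambda item: item[1], reverse=True))
--     box = []
--     for key, v in sorted_sizes.items():
--         box.extend(key for i in range(v))
--     box = set(box[:k])
--     return len(box)
-- ===== SOURCE B (Python) =====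
-- def solution(k, tangerine):
--     # size -> how many tangerines of that size
--     sizes = {}
--     for s in tangerine:
--         if s in sizes:
--             sizes[s] += 1
--         else:
--             sizes[s] = 1
--     # greedily open a box per size, biggest counts first, until k tangerines fit
--     boxes = 0
--     rem = k
--     for c in sorted(sizes.values(), reverse=True):
--         if rem <= 0:
--             break
--         boxes += 1
--         rem -= c
--     return boxes
-- ===== Notes on version B (the rewrite author's own statement) =====
-- stated objective: faster
-- what changed: B keeps A's size counting but replaces materializing the whole box list (one entry per tangerine), slicing it and building a set, by a single greedy accumulation over the descending-sorted counts with a remaining budget, so no per-tangerine list or set is ever built.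
-- intended difference: For negative k with -k < len(tangerine), Python's slice box[:k] counts from the end, so A returns the number of distinct sizes among all but the last |k| tangerines, while B returns 0 boxes, the intended answer when at most a non-positive number of tangerines is to be picked. — e.g. on solution(-1, [1, 1, 2]): A returns 1, B returns 0
import Mathlib
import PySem

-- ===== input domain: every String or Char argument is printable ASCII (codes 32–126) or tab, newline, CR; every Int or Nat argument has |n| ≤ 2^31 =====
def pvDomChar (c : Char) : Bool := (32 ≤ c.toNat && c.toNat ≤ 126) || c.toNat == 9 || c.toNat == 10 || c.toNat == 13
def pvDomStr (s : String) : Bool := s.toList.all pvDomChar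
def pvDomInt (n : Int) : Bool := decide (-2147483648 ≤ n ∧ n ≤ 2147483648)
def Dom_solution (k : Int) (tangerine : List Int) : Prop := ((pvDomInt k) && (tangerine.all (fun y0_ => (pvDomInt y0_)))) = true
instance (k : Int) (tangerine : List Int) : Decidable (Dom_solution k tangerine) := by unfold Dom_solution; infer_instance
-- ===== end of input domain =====

-- B keeps the counting dict but replaces the materialized per-tangerine box list, slice and set
-- by one greedy accumulation over the descending-sorted counts (objective: faster, measured).

-- ===== PORT A =====
def solution (k : Int) (tangerine : List Int) : Int :=
  let sizes := tangerine.foldl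
    (fun d s => if d.contains s then d.insert s (d.getD s 0 + 1) else d.insert s 1)
    PySem.Dict.empty
  let sorted_sizes := PySem.Dict.ofList (PySem.List.sorted sizes.items (fun item => item.2) true)
  let box := sorted_sizes.items.foldl
    (fun acc p => acc ++ (PySem.List.pyRange 0 p.2 1).map (fun _ => p.1)) []
  PySem.Set.len (PySem.Set.ofList (PySem.List.slice box none (some k)))

-- ===== PORT B =====
-- the for-loop over the sorted counts with its break, as structural recursion
def greedyLoop : Int → Int → List Int → Int
  | boxes, _, [] => boxes
  | boxes, rem, c :: cs => if rem ≤ 0 then boxes else greedyLoop (boxes + 1) (rem - c) cs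

def solution_alt (k : Int) (tangerine : List Int) : Int :=
  let sizes := tangerine.foldl
    (fun d s => if d.contains s then d.insert s (d.getD s 0 + 1) else d.insert s 1)
    PySem.Dict.empty
  greedyLoop 0 k (PySem.List.sorted sizes.values (fun v => v) true)

-- ===== PRECONDITION & SPEC =====
-- For negative k with -k < len(tangerine), Python's slice box[:k] counts from the end, so A returns
-- the number of distinct sizes among all but the last |k| tangerines, while B returns 0 boxes, the
-- intended answer when a non-positive number of tangerines is to be picked.
def D_solution (k : Int) (tangerine : List Int) : Prop := k < 0 ∧ 0 < k + tangerine.length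
instance (k : Int) (tangerine : List Int) : Decidable (D_solution k tangerine) := by unfold D_solution; infer_instance

def Spec_solution (k : Int) (tangerine : List Int) (out : Int) : Prop := ¬ D_solution k tangerine → out = solution_alt k tangerine
instance (k : Int) (tangerine : List Int) (out : Int) : Decidable (Spec_solution k tangerine out) := by unfold Spec_solution; infer_instance

def pvDiffWitness_solution : Int × List Int := (-1, [1, 1, 2])
def pvDiffWitnessOut_solution : Int × Int := (1, 0)

-- ===== CLAIM (what is proved, stated in full; the proofs are below) =====
def Claim_unchanged_solution : Prop := ∀ (k : Int) (tangerine : List Int), Dom_solution k tangerine → Spec_solution k tangerine (solution k tangerine)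
def Claim_changed_solution : Prop := Dom_solution (pvDiffWitness_solution.1) (pvDiffWitness_solution.2) ∧ D_solution (pvDiffWitness_solution.1) (pvDiffWitness_solution.2) ∧ solution (pvDiffWitness_solution.1) (pvDiffWitness_solution.2) = pvDiffWitnessOut_solution.1 ∧ solution_alt (pvDiffWitness_solution.1) (pvDiffWitness_solution.2) = pvDiffWitnessOut_solution.2 ∧ pvDiffWitnessOut_solution.1 ≠ pvDiffWitnessOut_solution.2
def Claim_exact_solution : Prop := ∀ (k : Int) (tangerine : List Int), Dom_solution k tangerine → D_solution k tangerine → solution k tangerine ≠ solution_alt k tangerine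

-- ===== LEMMAS AND PROOFS =====

-- A's counting loop is collections.Counter
lemma count_fold_eq (t : List Int) :
    t.foldl (fun d s => if d.contains s then d.insert s (d.getD s 0 + 1) else d.insert s 1)
      PySem.Dict.empty = PySem.Dict.counter t := by
  rw [PySem.Dict.counter]
  congr 1
  funext d s
  by_cases h : d.contains s = true
  · simp [PySem.Dict.modify, h]
  · simp only [h, if_false, Bool.false_eq_true]
    rw [PySem.Dict.modify, PySem.Dict.getD_of_not_contains d 0 (by simpa using h)]
    norm_num

-- dict(pairs) with distinct keys keeps exactly those pairs
lemma items_ofList_nodup (l : List (Int × Int)) (h : (l.map Prod.fst).Nodup) :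
    (PySem.Dict.ofList l).items = l := by
  have := PySem.Dict.items_foldl_insert_fresh l Prod.fst Prod.snd PySem.Dict.empty
    (fun a _ => by simp [PySem.Dict.contains, PySem.Dict.empty]) h
  simpa [PySem.Dict.ofList, PySem.Dict.update, PySem.Dict.empty] using this

-- the box-building loop is a flatMap of replicates
lemma box_eq_flatMap (l : List (Int × Int)) :
    l.foldl (fun acc p => acc ++ (PySem.List.pyRange 0 p.2 1).map (fun _ => p.1)) []
      = l.flatMap (fun p => List.replicate p.2.toNat p.1) := by
  rw [PySem.List.foldl_append_eq_flatMap]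
  simp only [List.nil_append]
  congr 1
  funext p
  rw [PySem.List.pyRange_one]
  show List.map (fun _ => p.1) _ = _
  rw [List.map_const']
  simp

-- |set(l)| is the Finset cardinality
lemma setLen_eq_card (l : List Int) :
    PySem.Set.len (PySem.Set.ofList l) = ((l.toFinset.card : Nat) : Int) := by
  rw [PySem.Set.len]
  congr 1
  have hnd := PySem.Set.nodup_ofList l
  have hfs : (PySem.Set.ofList l).toFinset = l.toFinset := by
    ext x; simp [List.mem_toFinset, PySem.Set.mem_ofList]
  rw [← List.toFinset_card_of_nodup hnd, hfs]

lemma map_insertBy (key : Int × Int → Int) (x : Int × Int) (l : List (Int × Int)) :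
    (PySem.List.insertBy (fun a b => decide (key b < key a)) x l).map key
      = PySem.List.insertBy (fun a b => decide (b < a)) (key x) (l.map key) := by
  induction l with
  | nil => simp [PySem.List.insertBy]
  | cons y ys ih =>
    simp only [PySem.List.insertBy, List.map_cons]
    by_cases h : key y < key x
    · simp [h]
    · simp [h, ih]

-- stable sort by a key commutes with projecting the key
lemma map_sorted_rev (l : List (Int × Int)) (key : Int × Int → Int) :
    (PySem.List.sorted l key true).map key
      = PySem.List.sorted (l.map key) (fun v => v) true := by
  rw [PySem.List.sorted_rev_eq_foldl_insertBy, PySem.List.sorted_rev_eq_foldl_insertBy]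
  suffices h : ∀ acc : List (Int × Int),
      (l.foldl (fun acc x => PySem.List.insertBy (fun a b => decide (key b < key a)) x acc) acc).map key
        = (l.map key).foldl (fun acc x => PySem.List.insertBy (fun a b => decide (b < a)) x acc) (acc.map key) by
    simpa using h []
  induction l with
  | nil => intro acc; simp
  | cons y ys ih =>
    intro acc
    simp only [List.foldl_cons, List.map_cons]
    rw [ih, map_insertBy]

lemma greedy_shift (cs : List Int) : ∀ (b rem : Int), greedyLoop b rem cs = b + greedyLoop 0 rem cs := by
  induction cs with
  | nil => intro b rem; simp [greedyLoop]
  | cons c cs ih =>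
    intro b rem
    by_cases h : rem ≤ 0
    · simp [greedyLoop, h]
    · simp only [greedyLoop, h, if_false]
      rw [ih (b + 1), ih (0 + 1)]
      ring

lemma greedy_nonpos (cs : List Int) (b rem : Int) (h : rem ≤ 0) : greedyLoop b rem cs = b := by
  cases cs <;> simp [greedyLoop, h]

-- the heart: distinct elements among the first n of the concatenated blocks = greedy box count
lemma core (items : List (Int × Int)) : ∀ (n : Nat),
    (items.map Prod.fst).Nodup → (∀ p ∈ items, 0 < p.2) →
    ((((items.flatMap (fun p => List.replicate p.2.toNat p.1)).take n).toFinset.card : Nat) : Int)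
      = greedyLoop 0 (n : Int) (items.map Prod.snd) := by
  induction items with
  | nil => intro n _ _; simp [greedyLoop]
  | cons p rest ih =>
    intro n hnd hpos
    obtain ⟨key, c⟩ := p
    simp only [List.map_cons, List.nodup_cons] at hnd
    have hc : 0 < c := hpos (key, c) (List.mem_cons_self)
    have hm : 0 < c.toNat := by omega
    have hcast : (c.toNat : Int) = c := Int.toNat_of_nonneg (le_of_lt hc)
    have hkey : key ∉ rest.flatMap (fun p => List.replicate p.2.toNat p.1) := by
      intro hmem
      rcases List.mem_flatMap.mp hmem with ⟨q, hq, hrep⟩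
      exact hnd.1 (List.mem_map.mpr ⟨q, hq, (List.eq_of_mem_replicate hrep).symm⟩)
    cases n with
    | zero => simp [greedyLoop]
    | succ n' =>
      have hn1 : ¬ ((((n' + 1 : Nat)) : Int) ≤ 0) := by push_cast; omega
      simp only [List.flatMap_cons, List.take_append, List.take_replicate,
        List.length_replicate, List.map_cons]
      have hmin : min (n' + 1) c.toNat ≠ 0 := by omega
      have hkey' : key ∉ ((rest.flatMap (fun p => List.replicate p.2.toNat p.1)).take (n' + 1 - c.toNat)) :=
        fun h => hkey (List.mem_of_mem_take h)
      rw [List.toFinset_append, List.toFinset_replicate_of_ne_zero hmin]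
      rw [Finset.singleton_union, Finset.card_insert_of_notMem (by simpa [List.mem_toFinset] using hkey')]
      rw [greedyLoop]
      simp only [hn1, if_false]
      rw [greedy_shift]
      by_cases hle : n' + 1 ≤ c.toNat
      · have h0 : n' + 1 - c.toNat = 0 := by omega
        have hrem : ((n' + 1 : Nat) : Int) - c ≤ 0 := by omega
        rw [h0, greedy_nonpos _ _ _ hrem]
        simp
      · have hIH := ih (n' + 1 - c.toNat) hnd.2 (fun q hq => hpos q (List.mem_cons_of_mem _ hq))
        have hcast2 : ((n' + 1 - c.toNat : Nat) : Int) = ((n' + 1 : Nat) : Int) - c := by omega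
        rw [hcast2] at hIH
        rw [← hIH]
        push_cast
        ring

lemma box_length (t : List Int) :
    ((PySem.List.sorted (PySem.Dict.counter t).items (fun item => item.2) true).flatMap
      (fun p => List.replicate p.2.toNat p.1)).length = t.length := by
  rw [List.length_flatMap]
  have hperm : (PySem.List.sorted (PySem.Dict.counter t).items (fun item => item.2) true).Perm
      (PySem.Dict.counter t).items := PySem.List.sorted_perm _ _ _
  rw [List.Perm.sum_eq (hperm.map _)]
  rw [PySem.Dict.items_counter]
  rw [List.map_map]
  have h1 : ((PySem.Set.ofList t).map ((fun a : Int × Int => (List.replicate a.2.toNat a.1).length) ∘ (fun k => (k, ((List.count k t : Nat) : Int))))).sum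
      = ((PySem.Set.ofList t).map (fun k => List.count k t)).sum := by
    congr 1
    apply List.map_congr_left
    intro k _
    simp
  rw [h1, ← List.sum_toFinset _ (PySem.Set.nodup_ofList t)]
  have h2 : (PySem.Set.ofList t).toFinset = t.toFinset := by
    ext x; simp [List.mem_toFinset, PySem.Set.mem_ofList]
  rw [h2, List.sum_toFinset_count_eq_length]

lemma sortedItems_nodup_fst (t : List Int) :
    ((PySem.List.sorted (PySem.Dict.counter t).items (fun item => item.2) true).map Prod.fst).Nodup := by
  have hperm : ((PySem.List.sorted (PySem.Dict.counter t).items (fun item => item.2) true).map Prod.fst).Perm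
      ((PySem.Dict.counter t).items.map Prod.fst) := (PySem.List.sorted_perm _ _ _).map _
  have hk := PySem.Dict.nodup_keys_counter t (κ := Int)
  rw [hperm.nodup_iff]
  simpa [PySem.Dict.keys] using hk

lemma sortedItems_pos (t : List Int) :
    ∀ p ∈ PySem.List.sorted (PySem.Dict.counter t).items (fun item => item.2) true, 0 < p.2 := by
  intro p hp
  have hp' : p ∈ (PySem.Dict.counter t).items := (PySem.List.mem_sorted _ _ _ _).mp hp
  rw [PySem.Dict.items_counter] at hp'
  rcases List.mem_map.mp hp' with ⟨k, hk, rfl⟩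
  have : k ∈ t := (PySem.Set.mem_ofList t k).mp hk
  have := List.count_pos_iff.mpr this
  simpa using this

lemma solution_eval (k : Int) (t : List Int) :
    solution k t = PySem.Set.len (PySem.Set.ofList (PySem.List.slice
      ((PySem.List.sorted (PySem.Dict.counter t).items (fun item => item.2) true).flatMap
        (fun p => List.replicate p.2.toNat p.1)) none (some k))) := by
  simp only [solution]
  rw [count_fold_eq, items_ofList_nodup _ (sortedItems_nodup_fst t), box_eq_flatMap]

lemma solution_alt_eval (k : Int) (t : List Int) :
    solution_alt k t = greedyLoop 0 k
      ((PySem.List.sorted (PySem.Dict.counter t).items (fun item => item.2) true).map (fun item => item.2)) := by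
  simp only [solution_alt]
  rw [count_fold_eq, map_sorted_rev]
  rfl

-- ===== VERDICT (by name: the statement is the Claim_ definition above) =====
theorem solution_spec : Claim_unchanged_solution := by
  intro k t _ hnd
  rw [solution_eval, solution_alt_eval]
  by_cases hk : 0 ≤ k
  · rw [PySem.List.slice_to _ hk, setLen_eq_card]
    have := core _ k.toNat (sortedItems_nodup_fst t) (sortedItems_pos t)
    rw [Int.toNat_of_nonneg hk] at this
    exact this
  · replace hk : k < 0 := by omega
    have hlen : k + (t.length : Int) ≤ 0 := by
      by_contra hgt
      exact hnd ⟨hk, by omega⟩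
    have hkpos : 0 < (-k).toNat := by omega
    have hkeq : k = -(((-k).toNat : Nat) : Int) := by omega
    rw [hkeq, PySem.List.slice_to_neg_natCast _ _ hkpos, box_length]
    have h0 : t.length - (-k).toNat = 0 := by omega
    rw [h0, List.take_zero]
    rw [greedy_nonpos _ _ _ (by omega)]
    decide

theorem solution_changed : Claim_changed_solution := by
  unfold Claim_changed_solution; decide

theorem solution_tight : Claim_exact_solution := by
  intro k t _ hd
  obtain ⟨hk, hlen⟩ := hd
  rw [solution_eval, solution_alt_eval]
  rw [greedy_nonpos _ _ _ (le_of_lt hk)]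
  have hkpos : 0 < (-k).toNat := by omega
  have hkeq : k = -(((-k).toNat : Nat) : Int) := by omega
  rw [hkeq, PySem.List.slice_to_neg_natCast _ _ hkpos, box_length]
  set box := (PySem.List.sorted (PySem.Dict.counter t).items (fun item => item.2) true).flatMap
    (fun p => List.replicate p.2.toNat p.1) with hbox
  set l := box.take (t.length - (-k).toNat) with hl
  have hlpos : 0 < l.length := by
    rw [hl, List.length_take, box_length]
    omega
  obtain ⟨x, hx⟩ := List.exists_mem_of_length_pos hlpos
  have hx' : x ∈ PySem.Set.ofList l := (PySem.Set.mem_ofList l x).mpr hx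
  have hpos : 0 < (PySem.Set.ofList l).length := List.length_pos_of_mem hx'
  rw [PySem.Set.len]
  intro hcontra
  omega
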